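-- pv_equiv track=rewrite | github.com/Ahmed7501/backend-code | src/team/invitations.py | validate_invitation_token
-- ===== SOURCE A (Python) =====
-- def validate_invitation_token(token: str) -> bool:
--     """
--     Validate invitation token format.
--
--     Args:
--         token: Token to validate
--
--     Returns:
--         bool: True if token format is valid, False otherwise
--     """
--     try:
--         # Basic validation - token should be URL-safe and reasonable length
--         if not token or len(token) < 20:
--             return False
--
--         # Check if token contains only URL-safe characters
--         import string
--         allowed_chars = string.ascii_letters + string.digits + '-_'
--         return all(c in allowed_chars for c in token)
--
--     except Exception:
--         return False
-- ===== SOURCE B (Python) =====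
-- import re
--
-- _TOKEN_RE = re.compile(r'[A-Za-z0-9_-]{20,}')
--
-- def validate_invitation_token(token: str) -> bool:
--     """Validate invitation token format with a single regular expression."""
--     try:
--         return bool(_TOKEN_RE.fullmatch(token))
--     except Exception:
--         return False
-- ===== Notes on version B (the rewrite author's own statement) =====
-- stated objective: idiomatic
-- what changed: Replaced the emptiness/length guard plus per-character membership scan over an explicit 64-character allowed string with a single compiled regular expression fullmatch r'[A-Za-z0-9_-]{20,}', whose quantifier subsumes the length check and whose character class subsumes the allowed set.
import Mathlib
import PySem

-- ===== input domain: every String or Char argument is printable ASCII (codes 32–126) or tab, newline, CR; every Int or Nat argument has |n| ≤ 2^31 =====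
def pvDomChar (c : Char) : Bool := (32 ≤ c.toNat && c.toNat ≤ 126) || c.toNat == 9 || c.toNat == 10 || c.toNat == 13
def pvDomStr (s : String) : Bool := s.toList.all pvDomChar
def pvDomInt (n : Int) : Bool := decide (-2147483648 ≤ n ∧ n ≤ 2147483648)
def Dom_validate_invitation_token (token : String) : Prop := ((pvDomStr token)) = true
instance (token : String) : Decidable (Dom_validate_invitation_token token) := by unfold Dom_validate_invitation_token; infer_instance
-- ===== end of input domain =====

-- B validates with a single regex fullmatch instead of A's explicit allowed-set membership scan; objective: idiomatic.

-- ===== PORT A =====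
-- allowed_chars = string.ascii_letters + string.digits + '-_' (as the list of its characters)
def pvAllowed : List Char :=
  ['a','b','c','d','e','f','g','h','i','j','k','l','m','n','o','p','q','r','s','t','u','v','w','x','y','z',
   'A','B','C','D','E','F','G','H','I','J','K','L','M','N','O','P','Q','R','S','T','U','V','W','X','Y','Z',
   '0','1','2','3','4','5','6','7','8','9','-','_']

def validate_invitation_token (token : String) : Bool :=
  -- 'if not token or len(token) < 20: return False'
  if token.toList.isEmpty || decide (PySem.Str.len token < 20) then false
  -- 'all(c in allowed_chars for c in token)' — for a single char c, 'c in allowed_chars' is membership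
  else token.toList.all (fun c => pvAllowed.contains c)

-- ===== PORT B =====
-- the regex character class [A-Za-z0-9_-], exact: a char matches iff it lies in one of the
-- three literal ranges or is one of the two literal chars, in the pattern's order
def pvTokenClassChar (c : Char) : Bool :=
  ('A' ≤ c && c ≤ 'Z') || ('a' ≤ c && c ≤ 'z') || ('0' ≤ c && c ≤ '9') || c == '_' || c == '-'

def validate_invitation_token_alt (token : String) : Bool :=
  -- re.fullmatch(r'[A-Za-z0-9_-]{20,}', token) matches iff the WHOLE string has ≥ 20 chars
  -- and every char matches the class (exact semantics of fullmatch for this fixed pattern)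
  decide (20 ≤ token.toList.length) && token.toList.all pvTokenClassChar

-- ===== PRECONDITION & SPEC =====
def Spec_validate_invitation_token (token : String) (out : Bool) : Prop := out = validate_invitation_token_alt token
instance (token : String) (out : Bool) : Decidable (Spec_validate_invitation_token token out) := by unfold Spec_validate_invitation_token; infer_instance

-- ===== CLAIM (what is proved, stated in full; the proofs are below) =====
def Claim_equal_validate_invitation_token : Prop := ∀ (token : String), Dom_validate_invitation_token token → Spec_validate_invitation_token token (validate_invitation_token token)

-- ===== LEMMAS AND PROOFS =====
theorem pv_char_le (c d : Char) : (c ≤ d) ↔ c.toNat ≤ d.toNat :=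
  Iff.trans Char.le_def UInt32.le_iff_toNat_le

theorem pv_char_eq (c d : Char) : (c = d) ↔ c.toNat = d.toNat :=
  ⟨fun h => h ▸ rfl, fun h => Char.ext (UInt32.toNat_inj.mp h)⟩

-- membership in A's explicit allowed list coincides with B's regex character class
theorem pv_char_lemma (c : Char) : pvAllowed.contains c = pvTokenClassChar c := by
  rw [Bool.eq_iff_iff]
  simp only [pvAllowed, pvTokenClassChar, List.contains_cons, List.contains_nil, Bool.or_false,
    Bool.or_eq_true, Bool.and_eq_true, beq_iff_eq, decide_eq_true_eq,
    pv_char_eq, pv_char_le]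
  simp only [show ('a'.toNat = 97) from rfl, show ('b'.toNat = 98) from rfl, show ('c'.toNat = 99) from rfl, show ('d'.toNat = 100) from rfl, show ('e'.toNat = 101) from rfl, show ('f'.toNat = 102) from rfl, show ('g'.toNat = 103) from rfl, show ('h'.toNat = 104) from rfl, show ('i'.toNat = 105) from rfl, show ('j'.toNat = 106) from rfl, show ('k'.toNat = 107) from rfl, show ('l'.toNat = 108) from rfl, show ('m'.toNat = 109) from rfl, show ('n'.toNat = 110) from rfl, show ('o'.toNat = 111) from rfl, show ('p'.toNat = 112) from rfl, show ('q'.toNat = 113) from rfl, show ('r'.toNat = 114) from rfl, show ('s'.toNat = 115) from rfl, show ('t'.toNat = 116) from rfl, show ('u'.toNat = 117) from rfl, show ('v'.toNat = 118) from rfl, show ('w'.toNat = 119) from rfl, show ('x'.toNat = 120) from rfl, show ('y'.toNat = 121) from rfl, show ('z'.toNat = 122) from rfl, show ('A'.toNat = 65) from rfl, show ('B'.toNat = 66) from rfl, show ('C'.toNat = 67) from rfl, show ('D'.toNat = 68) from rfl, show ('E'.toNat = 69) from rfl, show ('F'.toNat = 70) from rfl, show ('G'.toNat = 71) from rfl,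 show ('H'.toNat = 72) from rfl, show ('I'.toNat = 73) from rfl, show ('J'.toNat = 74) from rfl, show ('K'.toNat = 75) from rfl, show ('L'.toNat = 76) from rfl, show ('M'.toNat = 77) from rfl, show ('N'.toNat = 78) from rfl, show ('O'.toNat = 79) from rfl, show ('P'.toNat = 80) from rfl, show ('Q'.toNat = 81) from rfl, show ('R'.toNat = 82) from rfl, show ('S'.toNat = 83) from rfl, show ('T'.toNat = 84) from rfl, show ('U'.toNat = 85) from rfl, show ('V'.toNat = 86) from rfl, show ('W'.toNat = 87) from rfl, show ('X'.toNat = 88) from rfl, show ('Y'.toNat = 89) from rfl, show ('Z'.toNat = 90) from rfl, show ('0'.toNat = 48) from rfl, show ('1'.toNat = 49) from rfl, show ('2'.toNat = 50) from rfl, show ('3'.toNat = 51) from rfl, show ('4'.toNat = 52) from rfl, show ('5'.toNat = 53) from rfl, show ('6'.toNat = 54) from rfl, show ('7'.toNat = 55) from rfl, show ('8'.toNat = 56) from rfl, show ('9'.toNat = 57) from rfl, show ('-'.toNat = 45) from rfl, show ('_'.toNat = 95) from rfl]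
  omega

-- ===== VERDICT (by name: the statement is the Claim_ definition above) =====
theorem validate_invitation_token_spec : Claim_equal_validate_invitation_token := by
  intro token _
  show validate_invitation_token token = validate_invitation_token_alt token
  have hL : PySem.Str.len token = (token.toList.length : Int) := by
    rw [PySem.Str.len_eq]
  have hall : (token.toList.all fun c => pvAllowed.contains c) = token.toList.all pvTokenClassChar := by
    induction token.toList with
    | nil => rfl
    | cons a l ih => rw [List.all_cons, List.all_cons, ih, pv_char_lemma]
  unfold validate_invitation_token validate_invitation_token_alt
  by_cases h : token.toList.length < 20
  · have h1 : decide (PySem.Str.len token < 20) = true := by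
      rw [hL, decide_eq_true_eq]; exact_mod_cast h
    have h2 : decide (20 ≤ token.toList.length) = false := by
      rw [decide_eq_false_iff_not]; omega
    rw [h1, h2, Bool.or_true, if_pos rfl, Bool.false_and]
  · have h1 : decide (PySem.Str.len token < 20) = false := by
      rw [hL, decide_eq_false_iff_not]; intro hc; exact h (by exact_mod_cast hc)
    have h0 : token.toList.isEmpty = false := by
      cases hx : token.toList with
      | nil => rw [hx] at h; exact absurd (by norm_num) h
      | cons a l => rfl
    have h2 : decide (20 ≤ token.toList.length) = true := by
      rw [decide_eq_true_eq]; omega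
    rw [h0, h1, h2, Bool.or_self, if_neg Bool.false_ne_true, Bool.true_and, hall]
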